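-- pv_equiv track=rewrite | github.com/arobpetersen/Scanning-Dashboard | theme_dashboard/src/scanner_research.py | _archetype_relation
-- ===== SOURCE A (Python) =====
-- ARCHETYPE_FAMILY = {
--     "fintech_payments_lending": "finance",
--     "digital_identity_security": "identity_security",
--     "semiconductor_materials_electronics_materials": "semiconductor_materials",
--     "ai_infrastructure_data_centers": "ai_infrastructure",
--     "aerospace_defense_space_systems": "defense_space",
--     "networking_interconnect": "communications_hardware",
--     "software_devops_cloud": "software",
--     "healthcare_devices_services": "healthcare",
--     "industrial_materials_chemicals": "materials",
-- }
--
-- ARCHETYPE_ADJACENCY = {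
--     ("ai_infrastructure", "communications_hardware"),
--     ("ai_infrastructure", "semiconductor_materials"),
--     ("communications_hardware", "semiconductor_materials"),
--     ("finance", "software"),
--     ("identity_security", "software"),
--     ("materials", "semiconductor_materials"),
-- }
--
-- def _archetype_relation(candidate_archetypes: set[str], theme_archetypes: set[str]) -> str:
--     if not candidate_archetypes or not theme_archetypes:
--         return "unknown"
--     if candidate_archetypes & theme_archetypes:
--         return "direct"
--     candidate_families = {ARCHETYPE_FAMILY.get(value) for value in candidate_archetypes if ARCHETYPE_FAMILY.get(value)}
--     theme_families = {ARCHETYPE_FAMILY.get(value) for value in theme_archetypes if ARCHETYPE_FAMILY.get(value)}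
--     if candidate_families & theme_families:
--         return "adjacent"
--     for left in candidate_families:
--         for right in theme_families:
--             pair = tuple(sorted((left, right)))
--             if pair in ARCHETYPE_ADJACENCY:
--                 return "adjacent"
--     return "incompatible"
-- ===== SOURCE B (Python) =====
-- ARCHETYPE_FAMILY = {
--     "fintech_payments_lending": "finance",
--     "digital_identity_security": "identity_security",
--     "semiconductor_materials_electronics_materials": "semiconductor_materials",
--     "ai_infrastructure_data_centers": "ai_infrastructure",
--     "aerospace_defense_space_systems": "defense_space",
--     "networking_interconnect": "communications_hardware",
--     "software_devops_cloud": "software",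
--     "healthcare_devices_services": "healthcare",
--     "industrial_materials_chemicals": "materials",
-- }
--
-- ARCHETYPE_ADJACENCY = {
--     ("ai_infrastructure", "communications_hardware"),
--     ("ai_infrastructure", "semiconductor_materials"),
--     ("communications_hardware", "semiconductor_materials"),
--     ("finance", "software"),
--     ("identity_security", "software"),
--     ("materials", "semiconductor_materials"),
-- }
--
-- # Symmetric neighbor index built once: family -> set of adjacent families.
-- NEIGHBORS = {}
-- for _a, _b in ARCHETYPE_ADJACENCY:
--     NEIGHBORS.setdefault(_a, set()).add(_b)
--     NEIGHBORS.setdefault(_b, set()).add(_a)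
--
-- def _archetype_relation(candidate_archetypes: set, theme_archetypes: set) -> str:
--     if not candidate_archetypes or not theme_archetypes:
--         return "unknown"
--     if candidate_archetypes & theme_archetypes:
--         return "direct"
--     candidate_families = {ARCHETYPE_FAMILY.get(value) for value in candidate_archetypes if ARCHETYPE_FAMILY.get(value)}
--     theme_families = {ARCHETYPE_FAMILY.get(value) for value in theme_archetypes if ARCHETYPE_FAMILY.get(value)}
--     if candidate_families & theme_families:
--         return "adjacent"
--     candidate_adjacent = set()
--     for family in candidate_families:
--         candidate_adjacent |= NEIGHBORS.get(family, set())
--     if candidate_adjacent & theme_families: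
--         return "adjacent"
--     return "incompatible"
-- ===== Notes on version B (the rewrite author's own statement) =====
-- stated objective: alternative
-- what changed: Replaces A's nested double loop over family pairs (with a sorted-tuple lookup per pair) by a symmetric neighbor map precomputed once at module scope, a single union of neighbor sets over the candidate families, and one set intersection with the theme families.
import Mathlib
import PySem

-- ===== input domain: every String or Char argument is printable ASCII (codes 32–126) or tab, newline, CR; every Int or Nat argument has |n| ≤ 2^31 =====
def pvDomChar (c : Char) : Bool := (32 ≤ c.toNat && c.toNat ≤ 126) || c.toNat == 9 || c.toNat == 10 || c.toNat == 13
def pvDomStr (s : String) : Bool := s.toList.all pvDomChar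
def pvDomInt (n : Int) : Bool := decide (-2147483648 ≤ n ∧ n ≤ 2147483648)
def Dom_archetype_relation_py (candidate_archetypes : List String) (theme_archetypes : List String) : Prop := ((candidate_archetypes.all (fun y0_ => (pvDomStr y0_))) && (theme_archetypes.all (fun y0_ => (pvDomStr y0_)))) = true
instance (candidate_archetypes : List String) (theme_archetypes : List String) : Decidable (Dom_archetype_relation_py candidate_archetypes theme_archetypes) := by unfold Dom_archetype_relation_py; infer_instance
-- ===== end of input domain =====

-- B replaces A's nested pairwise scan over the adjacency set by a precomputed symmetric
-- neighbor map plus one union-and-intersect pass (alternative decomposition, same cost here).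


-- ===== PORT A =====
-- ARCHETYPE_FAMILY (module constant, shared by both Pythons)
def pvArchetypeFamily : PySem.Dict String String :=
  PySem.Dict.ofList
  [("fintech_payments_lending", "finance"),
   ("digital_identity_security", "identity_security"),
   ("semiconductor_materials_electronics_materials", "semiconductor_materials"),
   ("ai_infrastructure_data_centers", "ai_infrastructure"),
   ("aerospace_defense_space_systems", "defense_space"),
   ("networking_interconnect", "communications_hardware"),
   ("software_devops_cloud", "software"),
   ("healthcare_devices_services", "healthcare"),
   ("industrial_materials_chemicals", "materials")]

-- ARCHETYPE_ADJACENCY (module constant, shared): a set of sorted 2-tuples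
def pvAdjacency : List (String × String) :=
  [("ai_infrastructure", "communications_hardware"),
   ("ai_infrastructure", "semiconductor_materials"),
   ("communications_hardware", "semiconductor_materials"),
   ("finance", "software"),
   ("identity_security", "software"),
   ("materials", "semiconductor_materials")]

-- {ARCHETYPE_FAMILY.get(value) for value in xs if ARCHETYPE_FAMILY.get(value)}  (identical line in A and B)
def pvFamilies (xs : List String) : PySem.Set String :=
  xs.foldl (fun s v =>
    match PySem.Dict.get? pvArchetypeFamily v with
    | some f => PySem.Set.add s f
    | none => s) []

-- tuple(sorted((left, right))); the default string comparison is code-point lexicographic,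
-- written via toList (the same order on String) so the kernel can reduce it
def pvSortPair (l r : String) : List String :=
  PySem.List.sorted [l, r] (fun x => x.toList) false

def archetype_relation_py (candidate_archetypes : List String) (theme_archetypes : List String) : String :=
  if candidate_archetypes = [] ∨ theme_archetypes = [] then "unknown"
  else if candidate_archetypes.any (fun v => theme_archetypes.contains v) then "direct"
  else
    let candidate_families := pvFamilies candidate_archetypes
    let theme_families := pvFamilies theme_archetypes
    if candidate_families.any (fun f => theme_families.contains f) then "adjacent"
    else if candidate_families.any (fun left => theme_families.any (fun right =>
            (pvAdjacency.map (fun p => [p.1, p.2])).contains (pvSortPair left right))) then "adjacent"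
    else "incompatible"

-- ===== PORT B =====
-- NEIGHBORS: symmetric neighbor map built once from ARCHETYPE_ADJACENCY (module scope in Source B)
def pvNeighbors : PySem.Dict String (List String) :=
  pvAdjacency.foldl (fun d p =>
    let d1 := PySem.Dict.insert d p.1 (PySem.Set.add (PySem.Dict.getD d p.1 []) p.2)
    PySem.Dict.insert d1 p.2 (PySem.Set.add (PySem.Dict.getD d1 p.2 []) p.1)) PySem.Dict.empty

def archetype_relation_py_alt (candidate_archetypes : List String) (theme_archetypes : List String) : String :=
  if candidate_archetypes = [] ∨ theme_archetypes = [] then "unknown"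
  else if candidate_archetypes.any (fun v => theme_archetypes.contains v) then "direct"
  else
    let candidate_families := pvFamilies candidate_archetypes
    let theme_families := pvFamilies theme_archetypes
    if candidate_families.any (fun f => theme_families.contains f) then "adjacent"
    else
      let candidate_adjacent := candidate_families.foldl (fun s f =>
        (PySem.Dict.getD pvNeighbors f []).foldl (fun s2 x => PySem.Set.add s2 x) s) []
      if candidate_adjacent.any (fun x => theme_families.contains x) then "adjacent"
      else "incompatible"

-- ===== PRECONDITION & SPEC =====
def Spec_archetype_relation_py (candidate_archetypes : List String) (theme_archetypes : List String) (out : String) : Prop := out = archetype_relation_py_alt candidate_archetypes theme_archetypes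
instance (candidate_archetypes : List String) (theme_archetypes : List String) (out : String) : Decidable (Spec_archetype_relation_py candidate_archetypes theme_archetypes out) := by unfold Spec_archetype_relation_py; infer_instance

-- ===== CLAIM (what is proved, stated in full; the proofs are below) =====
def Claim_equal_archetype_relation_py : Prop := ∀ (candidate_archetypes : List String) (theme_archetypes : List String), Dom_archetype_relation_py candidate_archetypes theme_archetypes → Spec_archetype_relation_py candidate_archetypes theme_archetypes (archetype_relation_py candidate_archetypes theme_archetypes)

-- ===== LEMMAS AND PROOFS =====

-- The nine family values ARCHETYPE_FAMILY can produce
def pvFam9 : List String :=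
  ["finance", "identity_security", "semiconductor_materials", "ai_infrastructure",
   "defense_space", "communications_hardware", "software", "healthcare", "materials"]

lemma famGet_mem (v f : String) (h : PySem.Dict.get? pvArchetypeFamily v = some f) : f ∈ pvFam9 := by
  have e : pvArchetypeFamily = PySem.Dict.mk
    [("fintech_payments_lending", "finance"), ("digital_identity_security", "identity_security"),
     ("semiconductor_materials_electronics_materials", "semiconductor_materials"),
     ("ai_infrastructure_data_centers", "ai_infrastructure"),
     ("aerospace_defense_space_systems", "defense_space"),
     ("networking_interconnect", "communications_hardware"), ("software_devops_cloud", "software"),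
     ("healthcare_devices_services", "healthcare"), ("industrial_materials_chemicals", "materials")] := by rfl
  rw [e] at h
  simp only [PySem.Dict.get?_mk_cons] at h
  split_ifs at h <;> simp_all [pvFam9, PySem.Dict.get?]

lemma pvFamilies_aux (xs : List String) (s : PySem.Set String) (hs : ∀ x ∈ s, x ∈ pvFam9) :
    ∀ x ∈ xs.foldl (fun s v =>
      match PySem.Dict.get? pvArchetypeFamily v with
      | some f => PySem.Set.add s f
      | none => s) s, x ∈ pvFam9 := by
  induction xs generalizing s with
  | nil => simpa using hs
  | cons v vs ih =>
    intro x hx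
    rw [List.foldl_cons] at hx
    refine ih _ ?_ x hx
    intro y hy
    have hy' : y ∈ (match PySem.Dict.get? pvArchetypeFamily v with
      | some f => PySem.Set.add s f | none => s) := hy
    cases hg : PySem.Dict.get? pvArchetypeFamily v with
    | none => rw [hg] at hy'; exact hs y hy'
    | some f =>
      rw [hg] at hy'
      rcases (PySem.Set.mem_add s f y).1 hy' with h | h
      · exact hs y h
      · subst h; exact famGet_mem v y hg

lemma pvFamilies_mem_fam9 (xs : List String) : ∀ x ∈ pvFamilies xs, x ∈ pvFam9 :=
  pvFamilies_aux xs [] (by simp)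

-- pointwise: the sorted pair is in ARCHETYPE_ADJACENCY iff r is a recorded neighbor of l
lemma pvPair_iff : ∀ l ∈ pvFam9, ∀ r ∈ pvFam9,
    ((pvSortPair l r ∈ pvAdjacency.map (fun p => [p.1, p.2]))
      ↔ r ∈ PySem.Dict.getD pvNeighbors l []) := by decide

lemma pvUnion_mem (cf : List String) (s : PySem.Set String) (x : String) :
    (x ∈ cf.foldl (fun s f => (PySem.Dict.getD pvNeighbors f []).foldl (fun s2 y => PySem.Set.add s2 y) s) s)
      ↔ x ∈ s ∨ ∃ f ∈ cf, x ∈ PySem.Dict.getD pvNeighbors f [] := by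
  induction cf generalizing s with
  | nil => simp
  | cons f fs ih =>
    rw [List.foldl_cons, ih]
    have hinner : (x ∈ (PySem.Dict.getD pvNeighbors f []).foldl (fun s2 y => PySem.Set.add s2 y) s)
        ↔ x ∈ s ∨ x ∈ PySem.Dict.getD pvNeighbors f [] := by
      have := PySem.Set.mem_foldl_add (l := PySem.Dict.getD pvNeighbors f []) (s := s)
        (f := fun (y : String) => y) (y := x)
      simpa using this
    rw [hinner]
    constructor
    · rintro ((h | h) | ⟨g, hg, hx⟩)
      · exact Or.inl h
      · exact Or.inr ⟨f, by simp, h⟩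
      · exact Or.inr ⟨g, by simp [hg], hx⟩
    · rintro (h | ⟨g, hg, hx⟩)
      · exact Or.inl (Or.inl h)
      · rcases List.mem_cons.1 hg with rfl | hg
        · exact Or.inl (Or.inr hx)
        · exact Or.inr ⟨g, hg, hx⟩

-- A's nested scan and B's union-then-intersect test the same condition
lemma pvCond_eq (cf tf : List String) :
    ((pvFamilies cf).any (fun left => (pvFamilies tf).any (fun right =>
        (pvAdjacency.map (fun p => [p.1, p.2])).contains (pvSortPair left right)))) =
    (((pvFamilies cf).foldl (fun s f => (PySem.Dict.getD pvNeighbors f []).foldl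
        (fun s2 x => PySem.Set.add s2 x) s) []).any (fun x => (pvFamilies tf).contains x)) := by
  rw [Bool.eq_iff_iff]
  simp only [List.any_eq_true, List.contains_iff_mem]
  constructor
  · rintro ⟨l, hl, r, hr, hpair⟩
    exact ⟨r, (pvUnion_mem _ _ _).2 (Or.inr ⟨l, hl,
      (pvPair_iff l (pvFamilies_mem_fam9 cf l hl) r (pvFamilies_mem_fam9 tf r hr)).1 hpair⟩), by simpa using hr⟩
  · rintro ⟨x, hx, hxt⟩
    have hxt' : x ∈ pvFamilies tf := by simpa using hxt
    rcases (pvUnion_mem _ _ _).1 hx with h | ⟨f, hf, hn⟩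
    · simp at h
    · exact ⟨f, hf, x, hxt',
        (pvPair_iff f (pvFamilies_mem_fam9 cf f hf) x (pvFamilies_mem_fam9 tf x hxt')).2 hn⟩

-- ===== VERDICT (by name: the statement is the Claim_ definition above) =====
theorem archetype_relation_py_spec : Claim_equal_archetype_relation_py := by
  intro cand theme _
  unfold Spec_archetype_relation_py
  simp only [archetype_relation_py, archetype_relation_py_alt, pvCond_eq]
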